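-- pv_equiv track=rewrite | github.com/Humboof/PythonScripts | matrix_product.py | location_of_largest
-- ===== SOURCE A (Python) =====
-- def location_of_largest(amatrix):
--     most_a = 0
--     most_b = 0
--     largestval = 0
--     # loop through all matrix values using index method
--     for a in range(len(amatrix)):
--         for b in range(len(amatrix[a])):
--             # check if current value is higher than previous highest value
--             if largestval < abs(amatrix[a][b]):
--                 largestval = abs(amatrix[a][b])
--                 # store the value and index positions for true condition
--                 most_a = a
--                 most_b = b
--     return most_a, most_b
-- ===== SOURCE B (Python) =====
-- def _row_best(row):
--     best_abs = 0
--     best_col = 0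
--     for j, x in enumerate(row):
--         if best_abs < abs(x):
--             best_abs = abs(x)
--             best_col = j
--     return best_abs, best_col
--
--
-- def location_of_largest(amatrix):
--     row_bests = [_row_best(row) for row in amatrix]
--     best = 0
--     loc = (0, 0)
--     for i, (m, j) in enumerate(row_bests):
--         if best < m:
--             best = m
--             loc = (i, j)
--     return loc
-- ===== Notes on version B (the rewrite author's own statement) =====
-- stated objective: alternative
-- what changed: Replaces A's single nested index-based scan carrying one global (row, col, max) state with a two-level reduction: each row is first summarized independently to its (best_abs, first best column) pair, then a second pass over these per-row summaries picks the row whose best strictly exceeds the running global best.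
import Mathlib
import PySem

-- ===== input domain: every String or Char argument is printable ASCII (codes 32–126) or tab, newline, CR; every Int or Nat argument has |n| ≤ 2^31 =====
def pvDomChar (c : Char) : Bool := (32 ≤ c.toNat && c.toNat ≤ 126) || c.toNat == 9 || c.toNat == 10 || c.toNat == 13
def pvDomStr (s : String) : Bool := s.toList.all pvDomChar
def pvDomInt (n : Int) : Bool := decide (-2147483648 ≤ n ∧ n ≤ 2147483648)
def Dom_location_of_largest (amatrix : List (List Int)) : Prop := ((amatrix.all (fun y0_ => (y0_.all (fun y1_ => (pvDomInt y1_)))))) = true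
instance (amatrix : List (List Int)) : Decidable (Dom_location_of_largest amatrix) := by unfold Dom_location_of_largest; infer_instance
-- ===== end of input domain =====

-- B replaces A's single nested scan with per-row (best_abs, best_col) summaries plus a
-- second pass picking the strictly-greatest row summary; it is an alternative decomposition
-- of the same O(n*m) work, proved to return the same value.

-- ===== PORT A =====
-- literal transliteration of A's nested index loops; state = (most_a, most_b, largestval)
def location_of_largest (amatrix : List (List Int)) : Int × Int :=
  let t := (PySem.List.pyRange 0 amatrix.length 1).foldl
    (fun st a =>
      let row := PySem.List.pyGetD amatrix a []
      (PySem.List.pyRange 0 row.length 1).foldl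
        (fun st2 b =>
          if st2.2.2 < |PySem.List.pyGetD row b 0| then (a, b, |PySem.List.pyGetD row b 0|)
          else st2) st)
    ((0 : Int), (0 : Int), (0 : Int))
  (t.1, t.2.1)

-- ===== PORT B =====
-- per-row summary: (best absolute value, first column achieving it), strict comparisons
def pvRowBest (row : List Int) : Int × Int :=
  (PySem.List.enumerate row 0).foldl
    (fun bp p => if bp.1 < |p.2| then (|p.2|, p.1) else bp) ((0 : Int), (0 : Int))

def location_of_largest_alt (amatrix : List (List Int)) : Int × Int :=
  let rowBests := amatrix.map pvRowBest
  let r := (PySem.List.enumerate rowBests 0).foldl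
    (fun st p => if st.1 < p.2.1 then (p.2.1, (p.1, p.2.2)) else st)
    ((0 : Int), ((0 : Int), (0 : Int)))
  r.2

-- ===== PRECONDITION & SPEC =====
def Spec_location_of_largest (amatrix : List (List Int)) (out : Int × Int) : Prop := out = location_of_largest_alt amatrix
instance (amatrix : List (List Int)) (out : Int × Int) : Decidable (Spec_location_of_largest amatrix out) := by unfold Spec_location_of_largest; infer_instance

-- ===== CLAIM (what is proved, stated in full; the proofs are below) =====
def Claim_equal_location_of_largest : Prop := ∀ (amatrix : List (List Int)), Dom_location_of_largest amatrix → Spec_location_of_largest amatrix (location_of_largest amatrix)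

-- ===== LEMMAS AND PROOFS =====

theorem pvRowBest_append (ys : List Int) (x : Int) :
    pvRowBest (ys ++ [x]) =
      if (pvRowBest ys).1 < |x| then (|x|, (ys.length : Int)) else pvRowBest ys := by
  simp [pvRowBest, PySem.List.enumerate_append]

theorem pvRowBest_fst_nonneg (row : List Int) : 0 ≤ (pvRowBest row).1 := by
  induction row using List.reverseRecOn with
  | nil => simp [pvRowBest]
  | append_singleton ys x ih =>
    rw [pvRowBest_append]
    split <;> [positivity; exact ih]

-- A's inner loop over one row, started in state (ma, mb, L) with 0 ≤ L, is decided by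
-- the row's summary pvRowBest row.
theorem pv_inner (row : List Int) (a ma mb L : Int) (hL : 0 ≤ L) :
    (PySem.List.enumerate row 0).foldl
        (fun st2 p => if st2.2.2 < |p.2| then (a, p.1, |p.2|) else st2) (ma, mb, L)
      = if L < (pvRowBest row).1 then (a, (pvRowBest row).2, (pvRowBest row).1)
        else (ma, mb, L) := by
  induction row using List.reverseRecOn with
  | nil => simp [pvRowBest]; omega
  | append_singleton ys x ih =>
    have h0 := pvRowBest_fst_nonneg ys
    rw [PySem.List.enumerate_append, List.foldl_append, ih, pvRowBest_append]
    simp only [PySem.List.enumerate_cons, PySem.List.enumerate_nil, List.foldl_cons,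
      List.foldl_nil]
    rcases hmj : pvRowBest ys with ⟨m, j⟩
    rw [hmj] at h0
    simp only at h0
    by_cases h1 : m < |x| <;> by_cases h2 : L < m <;>
      simp only [if_pos, h1, h2, if_false] <;>
      split_ifs <;> simp_all <;> omega

-- B's second pass keeps its running best nonnegative.
theorem pv_outer_fst_nonneg (l : List (Int × (Int × Int))) (b : Int) (loc : Int × Int)
    (hb : 0 ≤ b) :
    0 ≤ (l.foldl (fun st p => if st.1 < p.2.1 then (p.2.1, (p.1, p.2.2)) else st) (b, loc)).1 := by
  induction l generalizing b loc with
  | nil => exact hb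
  | cons p l ih =>
    simp only [List.foldl_cons]
    split
    · exact ih _ _ (by omega)
    · exact ih _ _ hb

-- A's outer fold, rephrased over enumerate, equals B's fold over the per-row summaries,
-- up to rearranging the state triple.
theorem pv_outer (mat : List (List Int)) (ma mb L : Int) (hL : 0 ≤ L) :
    (PySem.List.enumerate mat 0).foldl
        (fun st p =>
          (PySem.List.enumerate p.2 0).foldl
            (fun st2 q => if st2.2.2 < |q.2| then (p.1, q.1, |q.2|) else st2) st) (ma, mb, L)
      = (fun r => (r.2.1, r.2.2, r.1))
          ((PySem.List.enumerate (mat.map pvRowBest) 0).foldl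
            (fun st p => if st.1 < p.2.1 then (p.2.1, (p.1, p.2.2)) else st)
            (L, (ma, mb))) := by
  induction mat using List.reverseRecOn with
  | nil => simp
  | append_singleton ys row ih =>
    have hb : 0 ≤ ((PySem.List.enumerate (ys.map pvRowBest) 0).foldl
        (fun st p => if st.1 < p.2.1 then (p.2.1, (p.1, p.2.2)) else st) (L, (ma, mb))).1 :=
      pv_outer_fst_nonneg _ _ _ hL
    rw [PySem.List.enumerate_append, List.foldl_append, ih, List.map_append,
      PySem.List.enumerate_append]
    simp only [PySem.List.enumerate_cons, PySem.List.enumerate_nil, List.foldl_cons,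
      List.foldl_nil, List.map_cons, List.map_nil, List.length_map]
    rw [pv_inner _ _ _ _ _ hb]
    split <;> rename_i hc <;> simp [hc]

-- ===== VERDICT (by name: the statement is the Claim_ definition above) =====
theorem location_of_largest_spec : Claim_equal_location_of_largest := by
  intro amatrix _
  unfold Spec_location_of_largest location_of_largest location_of_largest_alt
  -- rewrite A's pyRange/pyGetD loops as folds over enumerate
  have bridge : ∀ (α : Type) (xs : List α) (d : α) (σ : Type) (g : σ → Int → α → σ) (init : σ),
      (PySem.List.pyRange 0 xs.length 1).foldl (fun st j => g st j (PySem.List.pyGetD xs j d)) init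
        = (PySem.List.enumerate xs 0).foldl (fun st p => g st p.1 p.2) init := by
    intro α xs d σ g init
    rw [PySem.List.enumerate_eq_map_pyRange (d := d), List.foldl_map]
    rfl
  rw [bridge (List Int) amatrix [] _ (fun st a row =>
    (PySem.List.pyRange 0 row.length 1).foldl
      (fun st2 b => if st2.2.2 < |PySem.List.pyGetD row b 0| then (a, b, |PySem.List.pyGetD row b 0|) else st2) st)]
  simp only
  have inner : ∀ (st : Int × Int × Int) (p : Int × List Int),
      (PySem.List.pyRange 0 p.2.length 1).foldl
        (fun st2 b => if st2.2.2 < |PySem.List.pyGetD p.2 b 0| then (p.1, b, |PySem.List.pyGetD p.2 b 0|) else st2) st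
      = (PySem.List.enumerate p.2 0).foldl
        (fun st2 q => if st2.2.2 < |q.2| then (p.1, q.1, |q.2|) else st2) st := by
    intro st p
    rw [bridge Int p.2 0 _ (fun st2 b v => if st2.2.2 < |v| then (p.1, b, |v|) else st2)]
  simp only [inner]
  rw [pv_outer amatrix 0 0 0 le_rfl]
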